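-- pv_equiv track=rewrite | github.com/luffy2106/coding-exercises | interview/PayFlows/solution_recursive.py | find_connected_zero
-- ===== SOURCE A (Python) =====
-- def get_neighbor(matrix, i, j):
--     """Get neigbor of a node at the location (i,j)
--
--     Args:
--         matrix (_type_): _description_
--         i (_type_): _description_
--         j (_type_): _description_
--         set_connected_zero (_type_): _description_
--     """
--     neighbors = []
--     rows = len(matrix)
--     cols = len(matrix[0])
--     for x in range(i-1, i+2):
--         for y in range(j-1, j+2):
--             if  0<=x<rows and 0<=y<cols and (x,y) != (i,j):
--                 neighbors.append((x,y))
--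
--     return neighbors
--
-- def recursive_find_connected_neighbors(location_node, matrix, traveled_nodes, list_connected_neighbor):
--     neighbors = get_neighbor(matrix, location_node[0], location_node[1])
--     for neighbor in neighbors:
--         if neighbor not in traveled_nodes:
--             if matrix[neighbor[0]][neighbor[1]]==0:
--                 traveled_nodes.add(neighbor)
--                 list_connected_neighbor.append(neighbor)
--                 recursive_find_connected_neighbors(neighbor, matrix, traveled_nodes, list_connected_neighbor)
--
--     return list_connected_neighbor, traveled_nodes
--
-- def find_connected_zero(matrix, traveled_nodes):
--     list_connected_zero = []
--
--     for i in range(0, len(matrix)):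
--         for j in range(0, len(matrix[i])):
--             location_node = (i,j)
--             if location_node not in traveled_nodes:
--                 traveled_nodes.add(location_node)
--                 if matrix[i][j] == 0 :
--                     list_connected_neighbor = []
--                     list_connected_neighbor.append(location_node)
--                     list_connected_neighbor, traveled_nodes = recursive_find_connected_neighbors(location_node, matrix, traveled_nodes, list_connected_neighbor)
--                     list_connected_zero.append(list_connected_neighbor)
--     return list_connected_zero
-- ===== SOURCE B (Python) =====
-- def find_connected_zero(matrix, traveled_nodes):
--     # Iterative version: explicit DFS stack of pending-neighbor frames replaces
--     # the recursion (same discovery order).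
--     rows = len(matrix)
--     cols = len(matrix[0]) if matrix else 0
--     components = []
--     for i in range(rows):
--         for j in range(len(matrix[i])):
--             if (i, j) in traveled_nodes:
--                 continue
--             traveled_nodes.add((i, j))
--             if matrix[i][j] != 0:
--                 continue
--             component = [(i, j)]
--             stack = [[(x, y)
--                       for x in range(max(0, i - 1), min(rows, i + 2))
--                       for y in range(max(0, j - 1), min(cols, j + 2))
--                       if (x, y) != (i, j)]]
--             while stack:
--                 frame = stack[-1]
--                 if not frame:
--                     stack.pop()
--                     continue
--                 n = frame.pop(0)
--                 if n not in traveled_nodes and matrix[n[0]][n[1]] == 0: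
--                     traveled_nodes.add(n)
--                     component.append(n)
--                     a, b = n
--                     stack.append([(x, y)
--                                   for x in range(max(0, a - 1), min(rows, a + 2))
--                                   for y in range(max(0, b - 1), min(cols, b + 2))
--                                   if (x, y) != (a, b)])
--             components.append(component)
--     return components
-- ===== Notes on version B (the rewrite author's own statement) =====
-- stated objective: alternative
-- what changed: The recursive neighbor exploration is replaced by an explicit iterative DFS stack of pending-neighbor frames, with inlined clamped-range neighbor generation instead of the generate-then-bounds-check helper; discovery order and the traveled_nodes mutation are identical.
-- outside the precondition, e.g. on find_connected_zero([[0, 1], [1, 1], [1]], set()): A returns [[(0, 0)]], B returns [[(0, 0)]]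
import Mathlib
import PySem

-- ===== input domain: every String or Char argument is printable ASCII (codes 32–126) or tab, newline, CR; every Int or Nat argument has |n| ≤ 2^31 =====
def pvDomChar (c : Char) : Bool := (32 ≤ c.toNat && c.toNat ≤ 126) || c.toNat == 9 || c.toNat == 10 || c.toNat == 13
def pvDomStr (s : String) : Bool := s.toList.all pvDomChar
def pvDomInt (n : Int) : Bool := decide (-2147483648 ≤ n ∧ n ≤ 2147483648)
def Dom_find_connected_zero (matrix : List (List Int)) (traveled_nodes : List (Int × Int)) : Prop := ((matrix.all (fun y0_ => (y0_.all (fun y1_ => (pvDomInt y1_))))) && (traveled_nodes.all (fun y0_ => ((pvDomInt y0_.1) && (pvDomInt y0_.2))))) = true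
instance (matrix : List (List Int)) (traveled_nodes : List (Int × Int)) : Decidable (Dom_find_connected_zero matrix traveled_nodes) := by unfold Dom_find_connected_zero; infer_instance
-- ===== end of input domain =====

-- B replaces A's recursion by an explicit DFS stack of pending-neighbor frames (same
-- discovery order); equivalence is about the RETURN value only (both Python versions
-- mutate the traveled_nodes set argument, and they mutate it identically).

-- `matrix[x][y]`, totalized: the `.getD` defaults are never reached on rectangular
-- inputs (Pre_), where every generated neighbor index is in range.
def pvAt (matrix : List (List Int)) (n : Int × Int) : Int :=
  (PySem.List.pyGet? ((PySem.List.pyGet? matrix n.1).getD []) n.2).getD 1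

-- the cells of the bounding grid [0, len(matrix)) × [0, len(matrix[0])); used only by
-- the termination measure of the two loops below
def pvBox (matrix : List (List Int)) : List (Int × Int) :=
  (PySem.List.pyRange 0 (matrix.length : Int)).flatMap (fun a =>
    (PySem.List.pyRange 0 ((matrix.headD []).length : Int)).map (fun b => (a, b)))

-- termination measure: number of grid cells not yet traveled
def pvMiss (matrix : List (List Int)) (tr : PySem.Set (Int × Int)) : Nat :=
  (pvBox matrix).countP (fun c => !(PySem.Set.contains tr c))

lemma pvMiss_mono (matrix : List (List Int)) {tr tr' : PySem.Set (Int × Int)}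
    (h : ∀ x, x ∈ tr → x ∈ tr') : pvMiss matrix tr' ≤ pvMiss matrix tr := by
  apply List.countP_mono_left
  intro x _ hx
  simp only [Bool.not_eq_true', ← Bool.not_eq_true, PySem.Set.contains_iff] at hx ⊢
  exact fun hm => hx (h x hm)

lemma pvMiss_add_lt (matrix : List (List Int)) {tr : PySem.Set (Int × Int)} {n : Int × Int}
    (hn : n ∈ pvBox matrix) (hc : PySem.Set.contains tr n = false) :
    pvMiss matrix (PySem.Set.add tr n) < pvMiss matrix tr := by
  unfold pvMiss
  have hsub : ∀ c,
      (!(PySem.Set.contains (PySem.Set.add tr n) c)) = true → (!(PySem.Set.contains tr c)) = true := by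
    intro c h1
    simp only [Bool.not_eq_true', ← Bool.not_eq_true, PySem.Set.contains_iff,
      PySem.Set.mem_add] at h1 ⊢
    exact fun hm => h1 (Or.inl hm)
  obtain ⟨l1, l2, hsplit⟩ := List.mem_iff_append.mp hn
  rw [hsplit]
  have h1 := List.countP_mono_left (l := l1) (fun x _ => hsub x)
  have h2 := List.countP_mono_left (l := l2) (fun x _ => hsub x)
  have hmem : n ∈ PySem.Set.add tr n := (PySem.Set.mem_add tr n n).mpr (Or.inr rfl)
  have hn1 : (!(PySem.Set.contains (PySem.Set.add tr n) n)) = false := by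
    rw [Bool.not_eq_false', (PySem.Set.contains_iff _ _).mpr hmem]
  have hn2 : (!(PySem.Set.contains tr n)) = true := by rw [hc]; rfl
  rw [List.countP_append, List.countP_append, List.countP_cons, List.countP_cons, hn1, hn2]
  simp at h1 h2 ⊢
  omega

-- ===== PORT A =====

def get_neighbor (matrix : List (List Int)) (i j : Int) : List (Int × Int) :=
  -- rows = len(matrix), cols = len(matrix[0]); `headD []` totalizes matrix[0]
  -- (every caller passes a nonempty matrix)
  (PySem.List.pyRange (i-1) (i+2)).foldl (fun acc x =>
    (PySem.List.pyRange (j-1) (j+2)).foldl (fun acc y =>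
      if 0 ≤ x ∧ x < (matrix.length : Int) ∧ 0 ≤ y ∧ y < ((matrix.headD []).length : Int) ∧
          (x, y) ≠ (i, j) then acc ++ [(x, y)] else acc)
      acc) []

-- the loop body of recursive_find_connected_neighbors; the `n ∈ pvBox` conjunct is a
-- termination guard only: every list this is applied to is a get_neighbor output, on
-- whose members it always holds
def recLoop (matrix : List (List Int)) (ns : List (Int × Int)) (tr : PySem.Set (Int × Int))
    (acc : List (Int × Int)) :
    {p : List (Int × Int) × PySem.Set (Int × Int) // ∀ x, x ∈ tr → x ∈ p.2} :=
  match ns with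
  | [] => ⟨(acc, tr), fun _ h => h⟩
  | n :: rest =>
    if hc : n ∈ pvBox matrix ∧ PySem.Set.contains tr n = false ∧ pvAt matrix n = 0 then
      let r := recLoop matrix (get_neighbor matrix n.1 n.2) (PySem.Set.add tr n) (acc ++ [n])
      let r2 := recLoop matrix rest r.val.2 r.val.1
      ⟨r2.val, fun x hx => r2.property x (r.property x ((PySem.Set.mem_add tr n x).mpr (Or.inl hx)))⟩
    else
      recLoop matrix rest tr acc
termination_by (pvMiss matrix tr, ns.length)
decreasing_by
  · exact Prod.Lex.left _ _ (pvMiss_add_lt matrix hc.1 hc.2.1)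
  · exact Prod.Lex.left _ _
      (lt_of_le_of_lt (pvMiss_mono matrix r.property) (pvMiss_add_lt matrix hc.1 hc.2.1))
  · exact Prod.Lex.right _ (by simp)

def recursive_find_connected_neighbors (location_node : Int × Int) (matrix : List (List Int))
    (traveled_nodes : PySem.Set (Int × Int)) (list_connected_neighbor : List (Int × Int)) :
    List (Int × Int) × PySem.Set (Int × Int) :=
  (recLoop matrix (get_neighbor matrix location_node.1 location_node.2) traveled_nodes
    list_connected_neighbor).val

def find_connected_zero (matrix : List (List Int)) (traveled_nodes : List (Int × Int)) :
    List (List (Int × Int)) :=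
  ((PySem.List.pyRange 0 (matrix.length : Int)).foldl (fun st i =>
      (PySem.List.pyRange 0 (((PySem.List.pyGet? matrix i).getD []).length : Int)).foldl
        (fun st j =>
          if PySem.Set.contains st.2 (i, j) = false then
            let tr := PySem.Set.add st.2 (i, j)
            if pvAt matrix (i, j) = 0 then
              let r := recursive_find_connected_neighbors (i, j) matrix tr [(i, j)]
              (st.1 ++ [r.1], r.2)
            else (st.1, tr)
          else st) st)
      (([] : List (List (Int × Int))), PySem.Set.ofList traveled_nodes)).1

-- ===== PORT B =====

-- the clamped-range neighbor comprehension of Source B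
def pvNeighbors (matrix : List (List Int)) (a b : Int) : List (Int × Int) :=
  (PySem.List.pyRange (max 0 (a-1)) (min (matrix.length : Int) (a+2))).flatMap (fun x =>
    ((PySem.List.pyRange (max 0 (b-1)) (min ((matrix.headD []).length : Int) (b+2))).filter
      (fun y => decide ((x, y) ≠ (a, b)))).map (fun y => (x, y)))

-- the explicit DFS stack loop of Source B; frames are pending-neighbor lists; the
-- `n ∈ pvBox` conjunct is a termination guard only (frames are pvNeighbors outputs)
def loopB (matrix : List (List Int)) (stack : List (List (Int × Int)))
    (tr : PySem.Set (Int × Int)) (comp : List (Int × Int)) :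
    List (Int × Int) × PySem.Set (Int × Int) :=
  match stack with
  | [] => (comp, tr)
  | [] :: rest => loopB matrix rest tr comp
  | (n :: ns) :: rest =>
    if hc : n ∈ pvBox matrix ∧ PySem.Set.contains tr n = false ∧ pvAt matrix n = 0 then
      loopB matrix (pvNeighbors matrix n.1 n.2 :: ns :: rest) (PySem.Set.add tr n)
        (comp ++ [n])
    else loopB matrix (ns :: rest) tr comp
termination_by (pvMiss matrix tr, (stack.map (fun f => f.length + 1)).sum)
decreasing_by
  · exact Prod.Lex.right _ (by simp)
  · exact Prod.Lex.left _ _ (pvMiss_add_lt matrix hc.1 hc.2.1)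
  · exact Prod.Lex.right _ (by simp)

def find_connected_zero_alt (matrix : List (List Int)) (traveled_nodes : List (Int × Int)) :
    List (List (Int × Int)) :=
  ((PySem.List.pyRange 0 (matrix.length : Int)).foldl (fun st i =>
      (PySem.List.pyRange 0 (((PySem.List.pyGet? matrix i).getD []).length : Int)).foldl
        (fun st j =>
          if PySem.Set.contains st.2 (i, j) = true then st
          else
            let tr := PySem.Set.add st.2 (i, j)
            if pvAt matrix (i, j) ≠ 0 then (st.1, tr)
            else
              let r := loopB matrix [pvNeighbors matrix i j] tr [(i, j)]
              (st.1 ++ [r.1], r.2)) st)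
      (([] : List (List (Int × Int))), PySem.Set.ofList traveled_nodes)).1

-- ===== PRECONDITION & SPEC =====
-- Pre_ excludes matrices that contain a zero entry AND a row shorter than row 0: only
-- there can the Python code raise an IndexError (reading a zero cell's neighbor from a
-- row shorter than row 0); on such inputs where it happens to return, both programs
-- return the same value (the exclusion is only because the ports totalize the
-- out-of-range indexing).
def Pre_find_connected_zero (matrix : List (List Int)) (traveled_nodes : List (Int × Int)) : Prop :=
  (∀ row ∈ matrix, (matrix.headD []).length ≤ row.length) ∨
    (∀ row ∈ matrix, ∀ v ∈ row, v ≠ 0)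
instance (matrix : List (List Int)) (traveled_nodes : List (Int × Int)) : Decidable (Pre_find_connected_zero matrix traveled_nodes) := by unfold Pre_find_connected_zero; infer_instance
def pvWitness_find_connected_zero : List (List Int) × (List (Int × Int)) := ([[0, 1], [1, 0]], [])

def Spec_find_connected_zero (matrix : List (List Int)) (traveled_nodes : List (Int × Int)) (out : List (List (Int × Int))) : Prop := out = find_connected_zero_alt matrix traveled_nodes
instance (matrix : List (List Int)) (traveled_nodes : List (Int × Int)) (out : List (List (Int × Int))) : Decidable (Spec_find_connected_zero matrix traveled_nodes out) := by unfold Spec_find_connected_zero; infer_instance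

-- ===== CLAIM (what is proved, stated in full; the proofs are below) =====
def Claim_equal_find_connected_zero : Prop := ∀ (matrix : List (List Int)) (traveled_nodes : List (Int × Int)), Dom_find_connected_zero matrix traveled_nodes → Pre_find_connected_zero matrix traveled_nodes → Spec_find_connected_zero matrix traveled_nodes (find_connected_zero matrix traveled_nodes)

-- ===== LEMMAS AND PROOFS =====

lemma pvRange_nil {a b : Int} (h : b ≤ a) : PySem.List.pyRange a b = [] := by
  rw [List.eq_nil_iff_forall_not_mem]
  intro x hx
  rw [PySem.List.mem_pyRange_one] at hx
  omega

-- a consecutive integer range filtered to [0, r) is the clamped range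
lemma pvClamp (r : Int) : ∀ (k : Nat) (lo hi : Int), hi - lo ≤ (k : Int) →
    (PySem.List.pyRange lo hi).filter (fun x => decide (0 ≤ x ∧ x < r)) =
      PySem.List.pyRange (max 0 lo) (min r hi) := by
  intro k
  induction k with
  | zero =>
    intro lo hi h
    rw [pvRange_nil (by omega), pvRange_nil (by omega : min r hi ≤ max 0 lo), List.filter_nil]
  | succ k ih =>
    intro lo hi h
    by_cases hlo : hi ≤ lo
    · rw [pvRange_nil hlo, pvRange_nil (by omega : min r hi ≤ max 0 lo), List.filter_nil]
    · rw [PySem.List.pyRange_one_cons (by omega), List.filter_cons]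
      by_cases h0 : 0 ≤ lo ∧ lo < r
      · rw [if_pos (by simpa using h0), ih (lo + 1) hi (by omega)]
        rw [show max 0 (lo + 1) = lo + 1 by omega, show max 0 lo = lo by omega,
          PySem.List.pyRange_one_cons (by omega : lo < min r hi)]
      · rw [if_neg (by simpa using h0), ih (lo + 1) hi (by omega)]
        rcases not_and_or.mp h0 with h1 | h1
        · rw [show max 0 (lo + 1) = max 0 lo by omega]
        · rw [pvRange_nil (by omega : min r hi ≤ max 0 (lo + 1)),
            pvRange_nil (by omega : min r hi ≤ max 0 lo)]

lemma pv_flatMap_filter {α β : Type} (p : α → Bool) (g : α → List β) (l : List α) :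
    (l.filter p).flatMap g = l.flatMap (fun x => if p x then g x else []) := by
  induction l with
  | nil => rfl
  | cons x xs ih => cases hp : p x <;> simp [hp, ih]

lemma get_neighbor_eq (matrix : List (List Int)) (i j : Int) :
    get_neighbor matrix i j =
      (PySem.List.pyRange (i-1) (i+2)).flatMap (fun x =>
        ((PySem.List.pyRange (j-1) (j+2)).filter (fun y =>
          decide (0 ≤ x ∧ x < (matrix.length : Int) ∧ 0 ≤ y ∧
            y < ((matrix.headD []).length : Int) ∧ (x, y) ≠ (i, j)))).map (fun y => (x, y))) := by
  unfold get_neighbor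
  simp only [PySem.List.foldl_append_ite, PySem.List.foldl_append_eq_flatMap, List.nil_append]

lemma pvNeighbors_eq (matrix : List (List Int)) (a b : Int) :
    pvNeighbors matrix a b = get_neighbor matrix a b := by
  rw [get_neighbor_eq, pvNeighbors]
  rw [← pvClamp (matrix.length : Int) 3 (a-1) (a+2) (by omega)]
  rw [← pvClamp ((matrix.headD []).length : Int) 3 (b-1) (b+2) (by omega)]
  rw [pv_flatMap_filter]
  apply List.flatMap_congr
  intro x _
  by_cases hx : 0 ≤ x ∧ x < (matrix.length : Int)
  · rw [if_pos (by simpa using hx)]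
    rw [List.filter_filter]
    congr 1
    apply List.filter_congr
    intro y _
    simp [hx.1, hx.2, Bool.and_comm, Bool.and_left_comm]
  · rw [if_neg (by simpa using hx)]
    rw [List.filter_eq_nil_iff.mpr, List.map_nil]
    intro y _
    simp only [decide_eq_true_eq]
    intro hcon
    exact hx ⟨hcon.1, hcon.2.1⟩

-- step equations for the two loops
lemma recLoop_nil (matrix : List (List Int)) (tr : PySem.Set (Int × Int)) (acc : List (Int × Int)) :
    (recLoop matrix [] tr acc).val = (acc, tr) := by
  rw [recLoop]

lemma recLoop_cons_pos (matrix : List (List Int)) (n : Int × Int) (rest : List (Int × Int))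
    (tr : PySem.Set (Int × Int)) (acc : List (Int × Int))
    (hc : n ∈ pvBox matrix ∧ PySem.Set.contains tr n = false ∧ pvAt matrix n = 0) :
    (recLoop matrix (n :: rest) tr acc).val =
      (recLoop matrix rest
        (recLoop matrix (get_neighbor matrix n.1 n.2) (PySem.Set.add tr n) (acc ++ [n])).val.2
        (recLoop matrix (get_neighbor matrix n.1 n.2) (PySem.Set.add tr n) (acc ++ [n])).val.1).val := by
  rw [recLoop]
  rw [dif_pos hc]

lemma recLoop_cons_neg (matrix : List (List Int)) (n : Int × Int) (rest : List (Int × Int))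
    (tr : PySem.Set (Int × Int)) (acc : List (Int × Int))
    (hc : ¬(n ∈ pvBox matrix ∧ PySem.Set.contains tr n = false ∧ pvAt matrix n = 0)) :
    (recLoop matrix (n :: rest) tr acc).val = (recLoop matrix rest tr acc).val := by
  rw [recLoop]
  rw [dif_neg hc]

lemma loopB_nilcons (matrix : List (List Int)) (rest : List (List (Int × Int)))
    (tr : PySem.Set (Int × Int)) (comp : List (Int × Int)) :
    loopB matrix ([] :: rest) tr comp = loopB matrix rest tr comp := by
  rw [loopB]

lemma loopB_cons_pos (matrix : List (List Int)) (n : Int × Int) (ns : List (Int × Int))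
    (rest : List (List (Int × Int))) (tr : PySem.Set (Int × Int)) (comp : List (Int × Int))
    (hc : n ∈ pvBox matrix ∧ PySem.Set.contains tr n = false ∧ pvAt matrix n = 0) :
    loopB matrix ((n :: ns) :: rest) tr comp =
      loopB matrix (pvNeighbors matrix n.1 n.2 :: ns :: rest) (PySem.Set.add tr n) (comp ++ [n]) := by
  rw [loopB]
  rw [dif_pos hc]

lemma loopB_cons_neg (matrix : List (List Int)) (n : Int × Int) (ns : List (Int × Int))
    (rest : List (List (Int × Int))) (tr : PySem.Set (Int × Int)) (comp : List (Int × Int))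
    (hc : ¬(n ∈ pvBox matrix ∧ PySem.Set.contains tr n = false ∧ pvAt matrix n = 0)) :
    loopB matrix ((n :: ns) :: rest) tr comp = loopB matrix (ns :: rest) tr comp := by
  rw [loopB]
  rw [dif_neg hc]

-- defunctionalization: running the stack machine on a frame is running A's recursive
-- loop on that frame's list, then continuing with the rest of the stack
lemma loopB_frame (matrix : List (List Int)) :
    ∀ (k : Nat) (ns : List (Int × Int)) (tr : PySem.Set (Int × Int))
      (rest : List (List (Int × Int))) (comp : List (Int × Int)), pvMiss matrix tr < k →
      loopB matrix (ns :: rest) tr comp =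
        loopB matrix rest ((recLoop matrix ns tr comp).val.2) ((recLoop matrix ns tr comp).val.1) := by
  intro k
  induction k with
  | zero => intro _ tr _ _ hk; exact absurd hk (Nat.not_lt_zero _)
  | succ k ih =>
    intro ns
    induction ns with
    | nil =>
      intro tr rest comp _
      rw [loopB_nilcons, recLoop_nil]
    | cons n ns' ihn =>
      intro tr rest comp hk
      by_cases hc : n ∈ pvBox matrix ∧ PySem.Set.contains tr n = false ∧ pvAt matrix n = 0
      · rw [loopB_cons_pos matrix n ns' rest tr comp hc, pvNeighbors_eq]
        have hlt := pvMiss_add_lt matrix hc.1 hc.2.1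
        rw [ih (get_neighbor matrix n.1 n.2) (PySem.Set.add tr n) (ns' :: rest) (comp ++ [n])
          (by omega)]
        have hr := (recLoop matrix (get_neighbor matrix n.1 n.2) (PySem.Set.add tr n)
          (comp ++ [n])).property
        rw [ihn (recLoop matrix (get_neighbor matrix n.1 n.2) (PySem.Set.add tr n)
            (comp ++ [n])).val.2 rest
            (recLoop matrix (get_neighbor matrix n.1 n.2) (PySem.Set.add tr n) (comp ++ [n])).val.1
            (by have := pvMiss_mono matrix hr; omega)]
        rw [recLoop_cons_pos matrix n ns' tr comp hc]
      · rw [loopB_cons_neg matrix n ns' rest tr comp hc, ihn tr rest comp hk,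
          recLoop_cons_neg matrix n ns' tr comp hc]

lemma pv_body_eq (matrix : List (List Int)) (st : List (List (Int × Int)) × PySem.Set (Int × Int))
    (i j : Int) :
    (if PySem.Set.contains st.2 (i, j) = false then
        let tr := PySem.Set.add st.2 (i, j)
        if pvAt matrix (i, j) = 0 then
          let r := recursive_find_connected_neighbors (i, j) matrix tr [(i, j)]
          (st.1 ++ [r.1], r.2)
        else (st.1, tr)
      else st) =
    (if PySem.Set.contains st.2 (i, j) = true then st
      else
        let tr := PySem.Set.add st.2 (i, j)
        if pvAt matrix (i, j) ≠ 0 then (st.1, tr)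
        else
          let r := loopB matrix [pvNeighbors matrix i j] tr [(i, j)]
          (st.1 ++ [r.1], r.2)) := by
  cases hm : PySem.Set.contains st.2 (i, j) with
  | true => simp
  | false =>
    simp only [Bool.false_eq_true, if_false, if_true, ne_eq, ite_not]
    by_cases hv : pvAt matrix (i, j) = 0
    · simp only [hv, if_pos]
      rw [pvNeighbors_eq,
        loopB_frame matrix (pvMiss matrix (PySem.Set.add st.2 (i, j)) + 1)
          (get_neighbor matrix i j) (PySem.Set.add st.2 (i, j)) [] [(i, j)] (by omega)]
      rw [loopB]
      rfl
    · simp [hv]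

theorem pv_main (matrix : List (List Int)) (traveled_nodes : List (Int × Int)) :
    find_connected_zero matrix traveled_nodes = find_connected_zero_alt matrix traveled_nodes := by
  unfold find_connected_zero find_connected_zero_alt
  congr 1
  congr 1
  funext st i
  congr 1
  funext st j
  exact pv_body_eq matrix st i j

-- ===== VERDICT (by name: the statement is the Claim_ definition above) =====
theorem find_connected_zero_spec : Claim_equal_find_connected_zero := by
  intro matrix traveled_nodes _ _
  exact pv_main matrix traveled_nodes
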